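-- pv_equiv track=rewrite | github.com/Masoudjafaripour/AIFP | src/vlm_planner_tts.py | parse_action_sequence
-- ===== SOURCE A (Python) =====
-- MAX_PLAN_STEPS = 140
--
-- ACTIONS = [
--     (-1, 0), (1, 0), (0, -1), (0, 1),
--     (-1, -1), (-1, 1), (1, -1), (1, 1)
-- ]
--
-- def _extract_ints(text):
--     nums = []
--     cur = ""
--     for ch in text:
--         if ch in "-0123456789":
--             cur += ch
--         else:
--             if cur and cur != "-":
--                 nums.append(cur)
--             cur = ""
--     if cur and cur != "-":
--         nums.append(cur)
--     out = []
--     for n in nums: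
--         try:
--             out.append(int(n))
--         except ValueError:
--             pass
--     return out
--
-- def parse_action_sequence(decoded, max_len=MAX_PLAN_STEPS):
--     """
--     Accepts any text that contains integers.
--     We parse consecutive pairs as (dx,dy) and keep only those in ACTIONS.
--     """
--     tail = decoded.strip()[-4000:]
--     ints = _extract_ints(tail)
--     acts = []
--     for i in range(0, len(ints) - 1, 2):
--         dx, dy = ints[i], ints[i + 1]
--         if (dx, dy) in ACTIONS:
--             acts.append((dx, dy))
--         if len(acts) >= max_len:
--             break
--     return acts
-- ===== SOURCE B (Python) =====
-- MAX_PLAN_STEPS = 140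
--
-- ACTIONS = [
--     (-1, 0), (1, 0), (0, -1), (0, 1),
--     (-1, -1), (-1, 1), (1, -1), (1, 1)
-- ]
--
-- def parse_action_sequence(decoded, max_len=MAX_PLAN_STEPS):
--     """Single streaming pass: tokenize, convert, pair and filter in one loop
--     (a pending first coordinate instead of index arithmetic), stopping the
--     scan as soon as the cap is reached; no intermediate token/int lists."""
--     tail = decoded.strip()[-4000:]
--     acts = []
--     pending = None   # first coordinate of a half-built pair
--     run = ""         # current maximal dash/digit run
--     for ch in tail + " ":          # trailing non-run char flushes the last run
--         if ch == '-' or '0' <= ch <= '9':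
--             run += ch
--             continue
--         if run:
--             try:
--                 v = int(run)
--             except ValueError:
--                 v = None
--             run = ""
--             if v is not None:
--                 if pending is None:
--                     pending = v
--                 else:
--                     if (pending, v) in ACTIONS:
--                         acts.append((pending, v))
--                     pending = None
--                     if len(acts) >= max_len:
--                         return acts
--     return acts
-- ===== Notes on version B (the rewrite author's own statement) =====
-- stated objective: alternative
-- what changed: A's three staged passes (extract all tokens into a list, convert to an int list, then pair by index arithmetic range(0,len-1,2) with membership filtering) are fused into one streaming pass: a single loop over the characters drives a run accumulator, converts each completed run immediately, pairs through a pending-first-coordinate automaton instead of index strides, and returns mid-scan once the cap is reached, building no intermediate token/int lists.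
import Mathlib
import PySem

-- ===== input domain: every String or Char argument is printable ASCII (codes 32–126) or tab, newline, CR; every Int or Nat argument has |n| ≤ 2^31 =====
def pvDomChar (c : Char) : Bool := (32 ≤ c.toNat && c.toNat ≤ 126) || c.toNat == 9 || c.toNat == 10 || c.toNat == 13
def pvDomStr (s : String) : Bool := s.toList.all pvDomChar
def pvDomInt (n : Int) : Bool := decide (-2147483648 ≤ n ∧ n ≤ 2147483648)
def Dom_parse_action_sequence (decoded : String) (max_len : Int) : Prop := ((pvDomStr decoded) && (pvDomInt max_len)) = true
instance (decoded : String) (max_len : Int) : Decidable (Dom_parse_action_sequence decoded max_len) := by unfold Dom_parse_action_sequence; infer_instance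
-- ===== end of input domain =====

-- B fuses A's three staged passes (extract tokens, convert to ints, pair by index arithmetic)
-- into one streaming pass with a pending-first-coordinate pairing automaton and an early return
-- at the cap, building no intermediate lists; objective: alternative, same cost.

-- ===== PORT A =====
def ACTIONS : List (Int × Int) :=
  [(-1, 0), (1, 0), (0, -1), (0, 1), (-1, -1), (-1, 1), (1, -1), (1, 1)]

-- ch in "-0123456789"
def pvClsA (c : Char) : Bool := decide (c ∈ "-0123456789".toList)

-- "if cur and cur != '-': nums.append(cur)" (the flush step, written twice in the Python)
def pvFlush (st : List (List Char) × List Char) : List (List Char) :=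
  if st.2 ≠ [] ∧ st.2 ≠ ['-'] then st.1 ++ [st.2] else st.1

-- _extract_ints: first loop builds (nums, cur), flush, second loop int(n) with try/except
def pvExtractIntsA (text : List Char) : List Int :=
  let st := text.foldl
    (fun (s : List (List Char) × List Char) ch =>
      if pvClsA ch then (s.1, s.2 ++ [ch])
      else (pvFlush s, []))
    ([], [])
  (pvFlush st).foldl (fun out n =>
    match PySem.Int.ofChars? n with
    | some v => out ++ [v]
    | none => out) []

-- for i in range(0, len(ints)-1, 2): … break when len(acts) >= max_len
-- ints[i] / ints[i+1]: i is drawn from range(0, len-1, 2), so both indices are in range and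
-- pyGetD with any default is exact here (IndexError unreachable)
def pvLoopA (xs : List Int) (m : Int) : List Int → List (Int × Int) → List (Int × Int)
  | [], acts => acts
  | i :: is, acts =>
    let dx := PySem.List.pyGetD xs i 0
    let dy := PySem.List.pyGetD xs (i + 1) 0
    let acts' := if (dx, dy) ∈ ACTIONS then acts ++ [(dx, dy)] else acts
    if m ≤ (acts'.length : Int) then acts' else pvLoopA xs m is acts'

def parse_action_sequence (decoded : String) (max_len : Int) : List (Int × Int) :=
  let tail := PySem.List.slice (PySem.Str.strip decoded).toList (some (-4000)) none
  let ints := pvExtractIntsA tail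
  pvLoopA ints max_len (PySem.List.pyRange 0 ((ints.length : Int) - 1) 2) []

-- ===== PORT B =====
-- ch == '-' or '0' <= ch <= '9'
def pvClsB (c : Char) : Bool := c == '-' || ('0' ≤ c && c ≤ '9')

-- the single streaming loop of Source B: state = (acts, pending, run); early `return acts`
-- is the non-recursive branch at the cap
def pvScanB (m : Int) : List Char → List (Int × Int) → Option Int → List Char → List (Int × Int)
  | [], acts, _, _ => acts
  | ch :: rest, acts, pending, run =>
    if pvClsB ch then pvScanB m rest acts pending (run ++ [ch])
    else if run ≠ [] then
      match PySem.Int.ofChars? run with      -- try: v = int(run) except ValueError: v = None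
      | none => pvScanB m rest acts pending []
      | some v =>
        match pending with
        | none => pvScanB m rest acts (some v) []
        | some p =>
          let acts' := if (p, v) ∈ ACTIONS then acts ++ [(p, v)] else acts
          if m ≤ (acts'.length : Int) then acts' else pvScanB m rest acts' none []
    else pvScanB m rest acts pending []

def parse_action_sequence_alt (decoded : String) (max_len : Int) : List (Int × Int) :=
  let tail := PySem.List.slice (PySem.Str.strip decoded).toList (some (-4000)) none
  pvScanB max_len (tail ++ [' ']) [] none []

-- ===== PRECONDITION & SPEC =====
def Spec_parse_action_sequence (decoded : String) (max_len : Int) (out : List (Int × Int)) : Prop := out = parse_action_sequence_alt decoded max_len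
instance (decoded : String) (max_len : Int) (out : List (Int × Int)) : Decidable (Spec_parse_action_sequence decoded max_len out) := by unfold Spec_parse_action_sequence; infer_instance

-- ===== CLAIM (what is proved, stated in full; the proofs are below) =====
def Claim_equal_parse_action_sequence : Prop := ∀ (decoded : String) (max_len : Int), Dom_parse_action_sequence decoded max_len → Spec_parse_action_sequence decoded max_len (parse_action_sequence decoded max_len)

-- ===== LEMMAS AND PROOFS =====

-- proof-side: the maximal runs of class characters, left to right
def pvRuns : List Char → List (List Char)
  | [] => []
  | c :: rest =>
    if pvClsB c then (c :: rest.takeWhile pvClsB) :: pvRuns (rest.dropWhile pvClsB)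
    else pvRuns rest
termination_by cs => cs.length
decreasing_by
  · have := List.length_dropWhile_le pvClsB rest; simp; omega
  · simp

-- proof-side: feed a stream of ints through B's pairing automaton
def pvFeed (m : Int) : List Int → Option Int → List (Int × Int) → List (Int × Int)
  | [], _, acts => acts
  | v :: vs, none, acts => pvFeed m vs (some v) acts
  | v :: vs, some p, acts =>
    let acts' := if (p, v) ∈ ACTIONS then acts ++ [(p, v)] else acts
    if m ≤ (acts'.length : Int) then acts' else pvFeed m vs none acts'

-- proof-side: A's pairing loop re-expressed over the list of consecutive pairs
def pvLoopPairs (m : Int) : List (Int × Int) → List (Int × Int) → List (Int × Int)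
  | [], acts => acts
  | p :: ps, acts =>
    let acts' := if p ∈ ACTIONS then acts ++ [p] else acts
    if m ≤ (acts'.length : Int) then acts' else pvLoopPairs m ps acts'

-- proof-side: consecutive disjoint pairs
def pvPairsB : List Int → List (Int × Int)
  | [] => []
  | [_] => []
  | a :: b :: t => (a, b) :: pvPairsB t

lemma pvCls_eq (c : Char) : pvClsA c = pvClsB c := by
  have h : ("-0123456789" : String).toList = ['-','0','1','2','3','4','5','6','7','8','9'] := by decide
  rw [pvClsA, pvClsB, h, Bool.eq_iff_iff]
  simp only [Bool.or_eq_true, Bool.and_eq_true, beq_iff_eq, decide_eq_true_eq, List.mem_cons,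
    List.not_mem_nil, or_false, Char.ext_iff, Char.le_def, UInt32.le_iff_toNat_le, UInt32.ext_iff]
  have e0 : '-'.toNat = 45 := by decide
  have e1 : '0'.toNat = 48 := by decide
  have e2 : '1'.toNat = 49 := by decide
  have e3 : '2'.toNat = 50 := by decide
  have e4 : '3'.toNat = 51 := by decide
  have e5 : '4'.toNat = 52 := by decide
  have e6 : '5'.toNat = 53 := by decide
  have e7 : '6'.toNat = 54 := by decide
  have e8 : '7'.toNat = 55 := by decide
  have e9 : '8'.toNat = 56 := by decide
  have e10 : '9'.toNat = 57 := by decide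
  simp only [Char.toNat] at e0 e1 e2 e3 e4 e5 e6 e7 e8 e9 e10
  omega

lemma pvConv_eq (l : List (List Char)) (acc : List Int) :
    l.foldl (fun out n =>
      match PySem.Int.ofChars? n with
      | some v => out ++ [v]
      | none => out) acc = acc ++ l.filterMap PySem.Int.ofChars? := by
  induction l generalizing acc with
  | nil => simp
  | cons h t ih =>
    cases hv : PySem.Int.ofChars? h <;> simp [List.foldl_cons, hv, ih]

lemma pvFilterMap_filter (l : List (List Char)) :
    (l.filter (fun t => t ≠ ['-'])).filterMap PySem.Int.ofChars? = l.filterMap PySem.Int.ofChars? := by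
  have hdash : PySem.Int.ofChars? ['-'] = none := by decide
  induction l with
  | nil => rfl
  | cons h t ih =>
    simp only [ne_eq, decide_not] at ih ⊢
    by_cases hd : h = ['-']
    · subst hd; simp [hdash, ih]
    · cases hv : PySem.Int.ofChars? h <;> simp [hd, hv, ih]

lemma pvTake_all (cur : List Char) (c : Char) (rest : List Char)
    (h : ∀ x ∈ cur, pvClsB x = true) (hc : pvClsB c = false) :
    (cur ++ c :: rest).takeWhile pvClsB = cur ∧ (cur ++ c :: rest).dropWhile pvClsB = c :: rest := by
  induction cur with
  | nil => simp [hc]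
  | cons d t ih =>
    have hd : pvClsB d = true := h d (by simp)
    have := ih (fun x hx => h x (by simp [hx]))
    simp [hd, this]

lemma pvRuns_all_cls (cur : List Char) (hne : cur ≠ []) (h : ∀ x ∈ cur, pvClsB x = true) :
    pvRuns cur = [cur] := by
  cases cur with
  | nil => simp at hne
  | cons d t =>
    have hd : pvClsB d = true := h d (by simp)
    have ht : ∀ x ∈ t, pvClsB x = true := fun x hx => h x (by simp [hx])
    have hdrop : t.dropWhile pvClsB = [] := by
      rw [List.dropWhile_eq_nil_iff]; intro x hx; simp [ht x hx]
    have htake : t.takeWhile pvClsB = t := by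
      rw [List.takeWhile_eq_self_iff]; intro x hx; simp [ht x hx]
    rw [pvRuns]
    simp only [hd, if_pos, htake, hdrop, pvRuns]

lemma pvRuns_not_cls (c : Char) (rest : List Char) (hc : pvClsB c = false) :
    pvRuns (c :: rest) = pvRuns rest := by
  rw [pvRuns]; simp [hc]

lemma pvRuns_seed (cur : List Char) (c : Char) (rest : List Char)
    (hne : cur ≠ []) (h : ∀ x ∈ cur, pvClsB x = true) (hc : pvClsB c = false) :
    pvRuns (cur ++ c :: rest) = cur :: pvRuns rest := by
  cases cur with
  | nil => simp at hne
  | cons d t =>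
    have hd : pvClsB d = true := h d (by simp)
    have ht : ∀ x ∈ t, pvClsB x = true := fun x hx => h x (by simp [hx])
    have htd := pvTake_all t c rest ht hc
    rw [List.cons_append, pvRuns]
    simp only [hd, if_pos, htd.1, htd.2]
    rw [pvRuns]
    simp [hc]

-- A's token machine produces exactly the class runs minus bare "-"
lemma pvMachine_eq (cs : List Char) (nums : List (List Char)) (cur : List Char)
    (h : ∀ x ∈ cur, pvClsB x = true) :
    pvFlush
      (cs.foldl
        (fun (s : List (List Char) × List Char) ch =>
          if pvClsA ch then (s.1, s.2 ++ [ch])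
          else (pvFlush s, []))
        (nums, cur))
    = nums ++ (pvRuns (cur ++ cs)).filter (fun t => t ≠ ['-']) := by
  induction cs generalizing nums cur with
  | nil =>
    simp only [List.foldl_nil, List.append_nil]
    by_cases hc : cur = []
    · subst hc; simp [pvRuns, pvFlush]
    · rw [pvRuns_all_cls cur hc h]
      by_cases hm : cur = ['-'] <;> simp [pvFlush, hc, hm]
  | cons ch rest ih =>
    simp only [List.foldl_cons]
    by_cases hch : pvClsB ch = true
    · rw [pvCls_eq, hch]
      simp only [if_true]
      have h' : ∀ x ∈ cur ++ [ch], pvClsB x = true := by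
        intro x hx; rcases List.mem_append.mp hx with hx | hx
        · exact h x hx
        · simp at hx; subst hx; exact hch
      rw [ih nums (cur ++ [ch]) h']
      rw [List.append_assoc, List.singleton_append]
    · have hch' : pvClsB ch = false := by simpa using hch
      rw [pvCls_eq, hch']
      simp only [Bool.false_eq_true, if_false]
      rw [ih _ [] (by simp)]
      simp only [List.nil_append]
      by_cases hc : cur = []
      · subst hc
        simp only [List.nil_append]
        rw [pvRuns_not_cls ch rest hch']
        simp [pvFlush]
      · rw [pvRuns_seed cur ch rest hc h hch']
        by_cases hm : cur = ['-'] <;> simp [pvFlush, hc, hm, List.append_assoc]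

lemma pvInts_eq (text : List Char) :
    pvExtractIntsA text = (pvRuns text).filterMap PySem.Int.ofChars? := by
  unfold pvExtractIntsA
  rw [pvConv_eq]
  have hm := pvMachine_eq text [] [] (by simp)
  simp only [List.nil_append] at hm
  rw [hm]
  exact pvFilterMap_filter _

lemma pvLoop_eq (xs : List Int) (m : Int) (idxs : List Int) (acts : List (Int × Int)) :
    pvLoopA xs m idxs acts
      = pvLoopPairs m (idxs.map fun i => (PySem.List.pyGetD xs i 0, PySem.List.pyGetD xs (i + 1) 0)) acts := by
  induction idxs generalizing acts with
  | nil => rfl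
  | cons i is ih =>
    simp only [pvLoopA, pvLoopPairs, List.map_cons]
    split <;> split <;> simp_all

lemma pvAux_pairs (xs : List Int) :
    (List.range (xs.length / 2)).map (fun k => (xs.getD (2 * k) 0, xs.getD (2 * k + 1) 0))
      = pvPairsB xs := by
  induction xs using pvPairsB.induct with
  | case1 => rfl
  | case2 a => simp [pvPairsB]
  | case3 a b t ih =>
    have h2 : (a :: b :: t).length / 2 = t.length / 2 + 1 := by simp; omega
    rw [pvPairsB, h2, List.range_succ_eq_map, List.map_cons, List.map_map]
    have htail : (List.range (t.length / 2)).map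
        ((fun k => ((a :: b :: t).getD (2 * k) 0, (a :: b :: t).getD (2 * k + 1) 0)) ∘ Nat.succ)
        = pvPairsB t := by
      rw [← ih]
      apply List.map_congr_left
      intro k _
      have e1 : 2 * Nat.succ k = (2 * k + 1) + 1 := by omega
      simp only [Function.comp_apply, e1, List.getD_cons_succ]
    rw [htail]
    norm_num

lemma pvRange_pairs (xs : List Int) :
    (PySem.List.pyRange 0 ((xs.length : Int) - 1) 2).map
      (fun i => (PySem.List.pyGetD xs i 0, PySem.List.pyGetD xs (i + 1) 0)) = pvPairsB xs := by
  rw [PySem.List.pyRange_of_pos 0 ((xs.length : Int) - 1) (by norm_num), List.map_map]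
  have hcnt : (if (0:Int) < (xs.length : Int) - 1
      then (((xs.length : Int) - 1 - 0 + 2 - 1) / 2).toNat else 0) = xs.length / 2 := by
    split <;> omega
  rw [hcnt, ← pvAux_pairs xs]
  apply List.map_congr_left
  intro k _
  have e1 : (0 : Int) + 2 * (k : Int) = ((2 * k : Nat) : Int) := by push_cast; ring
  have e2 : ((2 * k : Nat) : Int) + 1 = ((2 * k + 1 : Nat) : Int) := by push_cast; ring
  simp only [Function.comp_apply, e1, e2, PySem.List.pyGetD_natCast]

-- B's fused scan equals feeding the converted runs through the pairing automaton
lemma pvScan_eq (m : Int) (cs : List Char) (run : List Char)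
    (h : ∀ x ∈ run, pvClsB x = true) (acts : List (Int × Int)) (pending : Option Int) :
    pvScanB m (cs ++ [' ']) acts pending run
      = pvFeed m ((pvRuns (run ++ cs)).filterMap PySem.Int.ofChars?) pending acts := by
  induction cs generalizing run acts pending with
  | nil =>
    have hsp : pvClsB ' ' = false := by decide
    simp only [List.nil_append, List.append_nil, pvScanB, hsp, Bool.false_eq_true, if_false]
    by_cases hc : run = []
    · subst hc; simp [pvRuns, pvFeed]
    · rw [pvRuns_all_cls run hc h]
      simp only [ne_eq, hc, not_false_eq_true, if_true, List.filterMap_cons, List.filterMap_nil]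
      cases hv : PySem.Int.ofChars? run with
      | none => simp [pvScanB, pvFeed]
      | some v =>
        dsimp only
        cases pending with
        | none => simp [pvScanB, pvFeed]
        | some p =>
          simp [pvFeed, pvScanB]
  | cons ch rest ih =>
    have ih0 : ∀ (acts : List (Int × Int)) (pending : Option Int),
        pvScanB m (rest ++ [' ']) acts pending []
          = pvFeed m ((pvRuns rest).filterMap PySem.Int.ofChars?) pending acts := by
      intro acts pending
      simpa using ih [] (by simp) acts pending
    simp only [List.cons_append, pvScanB]
    by_cases hch : pvClsB ch = true
    · rw [hch]
      simp only [if_true]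
      have h' : ∀ x ∈ run ++ [ch], pvClsB x = true := by
        intro x hx; rcases List.mem_append.mp hx with hx | hx
        · exact h x hx
        · simp at hx; subst hx; exact hch
      rw [ih (run ++ [ch]) h' acts pending, List.append_assoc, List.singleton_append]
    · have hch' : pvClsB ch = false := by simpa using hch
      rw [hch']
      simp only [Bool.false_eq_true, if_false]
      by_cases hc : run = []
      · subst hc
        simp only [ne_eq, not_true_eq_false, if_false, List.nil_append]
        rw [ih0 acts pending, pvRuns_not_cls ch rest hch']
      · rw [pvRuns_seed run ch rest hc h hch']
        simp only [ne_eq, hc, not_false_eq_true, if_true, List.filterMap_cons]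
        cases hv : PySem.Int.ofChars? run with
        | none => exact ih0 acts pending
        | some v =>
          dsimp only
          cases pending with
          | none => rw [ih0 acts (some v)]; rfl
          | some p =>
            simp only [pvFeed]
            rw [ih0]

-- feeding the ints one by one equals looping over the consecutive pairs
lemma pvFeed_pairs (m : Int) (xs : List Int) (acts : List (Int × Int)) :
    pvFeed m xs none acts = pvLoopPairs m (pvPairsB xs) acts := by
  induction xs using pvPairsB.induct generalizing acts with
  | case1 => rfl
  | case2 a => rfl
  | case3 a b t ih =>
    simp only [pvFeed, pvPairsB, pvLoopPairs]
    split <;> split <;> simp_all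

-- ===== VERDICT (by name: the statement is the Claim_ definition above) =====
theorem parse_action_sequence_spec : Claim_equal_parse_action_sequence := by
  intro decoded max_len _
  unfold Spec_parse_action_sequence parse_action_sequence parse_action_sequence_alt
  simp only [pvInts_eq, pvLoop_eq, pvRange_pairs]
  rw [pvScan_eq max_len _ [] (by simp) [] none, List.nil_append, pvFeed_pairs]
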